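-- pv_equiv track=rewrite | github.com/GoncaGomes/antennaAuto | src/mvp/parsers.py | _looks_equation_like
-- ===== SOURCE A (Python) =====
-- def _looks_equation_like(text: str) -> bool:
--     cleaned = text.strip()
--     if not cleaned:
--         return False
--     math_symbols = sum(cleaned.count(symbol) for symbol in ("=", "+", "-", "/", "^", "λ", "Ω", "µ", "π"))
--     alpha = sum(character.isalpha() for character in cleaned)
--     digits = sum(character.isdigit() for character in cleaned)
--     return math_symbols >= 3 and digits >= 2 and alpha <= max(24, digits * 4)
-- ===== SOURCE B (Python) =====
-- def _looks_equation_like(text: str) -> bool: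
--     cleaned = text.strip()
--     if not cleaned:
--         return False
--     math_symbols = 0
--     alpha = 0
--     digits = 0
--     for ch in cleaned:
--         if ch in "=+-/^λΩµπ":
--             math_symbols += 1
--         if ch.isalpha():
--             alpha += 1
--         if ch.isdigit():
--             digits += 1
--     return math_symbols >= 3 and digits >= 2 and alpha <= max(24, digits * 4)
-- ===== Notes on version B (the rewrite author's own statement) =====
-- stated objective: alternative
-- what changed: Replaces A's eleven staged full-string scans (nine substring .count calls plus two generator sums) with one fused pass over the string carrying three accumulators, classifying each character once via membership in the nine-symbol string.
import Mathlib
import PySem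

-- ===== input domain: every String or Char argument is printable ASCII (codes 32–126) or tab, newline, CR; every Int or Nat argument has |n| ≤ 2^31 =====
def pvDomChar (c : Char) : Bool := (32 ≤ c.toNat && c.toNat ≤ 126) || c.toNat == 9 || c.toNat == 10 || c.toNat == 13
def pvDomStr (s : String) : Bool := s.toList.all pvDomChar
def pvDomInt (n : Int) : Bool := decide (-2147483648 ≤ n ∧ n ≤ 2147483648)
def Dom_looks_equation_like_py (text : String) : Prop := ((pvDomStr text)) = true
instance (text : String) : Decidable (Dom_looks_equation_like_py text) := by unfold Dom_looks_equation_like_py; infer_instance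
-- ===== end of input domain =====

-- B replaces A's eleven staged full-string scans with one fused pass carrying three
-- accumulators (symbol/alpha/digit); objective: alternative (same asymptotic cost).


-- ===== PORT A =====
-- literal transliteration of A: strip, empty guard, nine substring counts, two 0/1 sums
def looks_equation_like_py (text : String) : Bool :=
  let cleaned := PySem.Str.strip text
  if cleaned.toList.isEmpty then false
  else
    let math_symbols : Int :=
      (["=", "+", "-", "/", "^", "λ", "Ω", "µ", "π"].map
        (fun symbol => (PySem.Str.count cleaned symbol : Int))).sum
    let alpha : Int :=
      (cleaned.toList.map (fun character => if PySem.Chars.isalpha character then (1 : Int) else 0)).sum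
    let digits : Int :=
      (cleaned.toList.map (fun character => if PySem.Chars.isdigit character then (1 : Int) else 0)).sum
    decide (3 ≤ math_symbols ∧ 2 ≤ digits ∧ alpha ≤ max 24 (digits * 4))

-- ===== PORT B =====
-- literal transliteration of B: one fused loop over the characters carrying three
-- accumulators; `ch in "=+-/^λΩµπ"` is PySem.Chars.isIn [ch] (substring test, exact)
def looks_equation_like_py_alt (text : String) : Bool :=
  let cleaned := PySem.Str.strip text
  if cleaned.toList.isEmpty then false
  else
    let mad : Int × Int × Int :=
      cleaned.toList.foldl (fun acc ch =>
        ((if PySem.Chars.isIn [ch] "=+-/^λΩµπ".toList then acc.1 + 1 else acc.1),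
         (if PySem.Chars.isalpha ch then acc.2.1 + 1 else acc.2.1),
         (if PySem.Chars.isdigit ch then acc.2.2 + 1 else acc.2.2))) (0, 0, 0)
    decide (3 ≤ mad.1 ∧ 2 ≤ mad.2.2 ∧ mad.2.1 ≤ max 24 (mad.2.2 * 4))

-- ===== PRECONDITION & SPEC =====
def Spec_looks_equation_like_py (text : String) (out : Bool) : Prop := out = looks_equation_like_py_alt text
instance (text : String) (out : Bool) : Decidable (Spec_looks_equation_like_py text out) := by unfold Spec_looks_equation_like_py; infer_instance

-- ===== CLAIM (what is proved, stated in full; the proofs are below) =====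
def Claim_equal_looks_equation_like_py : Prop := ∀ (text : String), Dom_looks_equation_like_py text → Spec_looks_equation_like_py text (looks_equation_like_py text)

-- ===== LEMMAS AND PROOFS =====

-- counting a single-character substring is counting that character
lemma count_go_single (c : Char) (l : List Char) (acc fuel : Nat) (hf : l.length ≤ fuel) :
    PySem.Chars.count.go [c] fuel l acc = acc + l.count c := by
  induction l generalizing acc fuel with
  | nil => cases fuel <;> simp [PySem.Chars.count.go]
  | cons h t ih =>
    cases fuel with
    | zero => simp at hf
    | succ f =>
      have hf' : t.length ≤ f := by simpa using hf
      by_cases hc : c = h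
      · subst hc
        simp only [PySem.Chars.count.go, List.isPrefixOf, List.count_cons, BEq.rfl,
          Bool.true_and, List.isPrefixOf.eq_1, if_true, List.length_cons, List.length_nil,
          List.drop_succ_cons, List.drop_zero, ih (acc+1) f hf']
        omega
      · have hb : (c == h) = false := by simp [hc]
        have hb' : (h == c) = false := by simp; exact fun e => hc e.symm
        simp only [PySem.Chars.count.go, List.isPrefixOf, hb, Bool.false_and,
          ih acc f hf']
        simp [List.count_cons, hb']

lemma count_single (cs : List Char) (c : Char) :
    PySem.Chars.count cs [c] = cs.count c := by
  simp [PySem.Chars.count, count_go_single c cs 0 cs.length (le_refl _)]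

-- a single-character substring test is membership
lemma isIn_single (c : Char) (l : List Char) :
    PySem.Chars.isIn [c] l = l.contains c := by
  have hiff := PySem.Chars.isIn_iff_infix [c] l
  by_cases h : c ∈ l
  · simp [hiff.mpr ((List.singleton_infix_iff c l).mpr h), h]
  · have hni : ¬ ([c] <:+: l) := fun hi => h ((List.singleton_infix_iff c l).mp hi)
    simp only [List.contains_eq_mem, h, decide_false]
    exact Bool.eq_false_iff.mpr (fun he => hni (hiff.mp he))

-- summing 1 at the unique position c in a nodup list
lemma sum_map_indicator (S : List Char) (c : Char) (x : Int) (hnd : S.Nodup) (hc : c ∈ S) :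
    (S.map (fun k => if k = c then x else 0)).sum = x := by
  induction S with
  | nil => simp at hc
  | cons a t ih =>
    rcases List.mem_cons.mp hc with h | h
    · have hnotin : c ∉ t := h ▸ (List.nodup_cons.mp hnd).1
      have hz : (t.map (fun k => if k = c then x else 0)).sum = 0 := by
        apply List.sum_eq_zero; intro y hy
        simp only [List.mem_map] at hy
        obtain ⟨k, hk, rfl⟩ := hy
        have hne : k ≠ c := fun he => hnotin (he ▸ hk)
        simp [hne]
      simp [← h, hz]
    · have hne : a ≠ c := fun he => (List.nodup_cons.mp hnd).1 (he ▸ h)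
      simp [hne, ih (List.nodup_cons.mp hnd).2 h]

-- A's nine per-symbol counts sum to one countP over the symbol alphabet
lemma sum_counts (syms cs : List Char) (hnd : syms.Nodup) :
    (syms.map (fun k => (cs.count k : Int))).sum
      = (cs.countP (fun c => syms.contains c) : Int) := by
  induction cs with
  | nil => simp [List.sum_eq_zero]
  | cons c t ih =>
    have hstep : ∀ k, ((c :: t).count k : Int)
        = (t.count k : Int) + (if k = c then (1:Int) else 0) := by
      intro k
      by_cases hkc : k = c
      · subst hkc; simp
      · have : (c == k) = false := by simp; exact fun h => hkc h.symm
        simp [List.count_cons, this, hkc]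
    calc (syms.map (fun k => ((c :: t).count k : Int))).sum
        = (syms.map (fun k => (t.count k : Int) + (if k = c then (1:Int) else 0))).sum := by
          congr 1; exact List.map_congr_left (fun k _ => hstep k)
      _ = (syms.map (fun k => (t.count k : Int))).sum
            + (syms.map (fun k => if k = c then (1:Int) else 0)).sum :=
          PySem.List.sum_map_add_int syms _ _
      _ = ((c :: t).countP (fun x => syms.contains x) : Int) := by
          rw [ih, List.countP_cons]
          by_cases hc : c ∈ syms
          · rw [sum_map_indicator syms c 1 hnd hc]
            simp [hc]
          · have hz : (syms.map (fun k => if k = c then (1:Int) else 0)).sum = 0 := by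
              apply List.sum_eq_zero; intro y hy
              simp only [List.mem_map] at hy
              obtain ⟨k, hk, rfl⟩ := hy
              have : k ≠ c := fun he => hc (he ▸ hk)
              simp [this]
            rw [hz]
            simp [hc]

-- B's fused loop computes the three countP's
lemma fused_foldl (l : List Char) (a b c : Int) :
    l.foldl (fun acc ch =>
        ((if PySem.Chars.isIn [ch] "=+-/^λΩµπ".toList then acc.1 + 1 else acc.1),
         (if PySem.Chars.isalpha ch then acc.2.1 + 1 else acc.2.1),
         (if PySem.Chars.isdigit ch then acc.2.2 + 1 else acc.2.2))) (a, b, c)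
    = (a + (l.countP (fun ch => ("=+-/^λΩµπ".toList).contains ch) : Int),
       b + (l.countP PySem.Chars.isalpha : Int),
       c + (l.countP PySem.Chars.isdigit : Int)) := by
  induction l generalizing a b c with
  | nil => simp
  | cons ch t ih =>
    rw [List.foldl_cons]
    show _ = _
    rw [ih]
    simp only [List.countP_cons, isIn_single]
    refine Prod.ext ?_ (Prod.ext ?_ ?_) <;> dsimp <;> split_ifs with h <;>
      simp_all <;> omega

-- ===== VERDICT (by name: the statement is the Claim_ definition above) =====
theorem looks_equation_like_py_spec : Claim_equal_looks_equation_like_py := by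
  intro text _
  unfold Spec_looks_equation_like_py looks_equation_like_py looks_equation_like_py_alt
  by_cases hemp : (PySem.Str.strip text).toList.isEmpty
  · rw [if_pos hemp, if_pos hemp]
  · rw [if_neg hemp, if_neg hemp]
    dsimp only
    rw [fused_foldl]
    have hmath : (["=", "+", "-", "/", "^", "λ", "Ω", "µ", "π"].map
        (fun symbol => (PySem.Str.count (PySem.Str.strip text) symbol : Int))).sum
        = ((PySem.Str.strip text).toList.countP
            (fun ch => ("=+-/^λΩµπ".toList).contains ch) : Int) := by
      rw [← sum_counts "=+-/^λΩµπ".toList (PySem.Str.strip text).toList (by decide)]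
      simp [PySem.Str.count_eq, count_single]
    rw [hmath]
    simp only [zero_add, PySem.List.sum_map_ite_one_zero]
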